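-- pv_equiv track=rewrite | github.com/Hossain-Anas/CSE422 | LAB-03/Minimax.py | minimax_mind_control
-- ===== SOURCE A (Python) =====
-- def minimax_mind_control(depth, nodeidx, max_player, val):
--     if depth == 0:
--         return val[nodeidx]
--
--     if max_player:
--         left_val = minimax_mind_control(depth-1, nodeidx*2, False, val)
--         right_val = minimax_mind_control(depth-1, nodeidx*2 + 1, False, val)
--
--         return max(left_val, right_val)
--
--     else:
--         left_val = minimax_mind_control(depth-1, nodeidx*2, True, val)
--         right_val = minimax_mind_control(depth-1, nodeidx*2 + 1, True, val)
--
--         # return min(left_val, right_val)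
--         return max(left_val, right_val)
-- ===== SOURCE B (Python) =====
-- def minimax_mind_control(depth, nodeidx, max_player, val):
--     # max_player is irrelevant: both branches of A return max, so the result
--     # is the maximum of the 2**depth contiguous leaves of the subtree.
--     count = 2 ** depth
--     start = nodeidx * count
--     best = val[start]
--     for i in range(1, count):
--         x = val[start + i]
--         if x > best:
--             best = x
--     return best
-- ===== Notes on version B (the rewrite author's own statement) =====
-- stated objective: simpler
-- what changed: Replaces the binary recursion (which ignores max_player since both branches take max) by a single linear loop taking the running max over the contiguous leaf range starting at nodeidx*2**depth, with explicit indexing so IndexError behaviour is preserved.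
import Mathlib
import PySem

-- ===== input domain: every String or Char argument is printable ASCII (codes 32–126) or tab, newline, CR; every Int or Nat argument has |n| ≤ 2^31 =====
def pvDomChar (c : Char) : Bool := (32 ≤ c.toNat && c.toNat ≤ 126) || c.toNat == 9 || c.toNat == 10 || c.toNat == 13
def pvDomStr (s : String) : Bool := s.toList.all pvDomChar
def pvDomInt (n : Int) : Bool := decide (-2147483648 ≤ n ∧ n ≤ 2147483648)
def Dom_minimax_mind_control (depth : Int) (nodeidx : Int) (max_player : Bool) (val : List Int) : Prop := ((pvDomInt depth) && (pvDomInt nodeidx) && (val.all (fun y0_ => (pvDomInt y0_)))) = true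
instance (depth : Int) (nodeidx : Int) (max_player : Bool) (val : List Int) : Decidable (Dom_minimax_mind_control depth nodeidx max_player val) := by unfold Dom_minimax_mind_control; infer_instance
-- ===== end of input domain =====

-- B: one flat loop taking the running max over the 2**depth contiguous leaves (A's max_player
-- flag is irrelevant since both branches take max), instead of A's binary recursion.

-- ===== PORT A =====
-- recursion on the fuel depth.toNat; Pre_ requires 0 ≤ depth (Python recurses forever on depth < 0)
def pvGoA (val : List Int) : Nat → Int → Bool → Int
  | 0, idx, _ => PySem.List.pyGetD val idx 0
  | n+1, idx, mp =>
    if mp then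
      let left_val := pvGoA val n (idx*2) false
      let right_val := pvGoA val n (idx*2 + 1) false
      max left_val right_val
    else
      let left_val := pvGoA val n (idx*2) true
      let right_val := pvGoA val n (idx*2 + 1) true
      max left_val right_val

def minimax_mind_control (depth : Int) (nodeidx : Int) (max_player : Bool) (val : List Int) : Int :=
  pvGoA val depth.toNat nodeidx max_player

-- ===== PORT B =====
def minimax_mind_control_alt (depth : Int) (nodeidx : Int) (max_player : Bool) (val : List Int) : Int :=
  let count : Int := 2 ^ depth.toNat
  let start : Int := nodeidx * count
  (PySem.List.pyRange 1 count 1).foldl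
    (fun best i =>
      let x := PySem.List.pyGetD val (start + i) 0
      if x > best then x else best)
    (PySem.List.pyGetD val start 0)

-- ===== PRECONDITION & SPEC =====
-- Pre_ excludes exactly the inputs on which Python A does not return: depth < 0 (unbounded
-- recursion) and subtrees with a leaf index out of range (IndexError).  The leaves are the
-- contiguous indices nodeidx*2^depth .. nodeidx*2^depth + 2^depth - 1, all in range iff the two
-- bounds below hold; 'depth < 64' only keeps 2^depth computable and excludes no input A returns
-- on (with 2^64 leaves some leaf index is out of range of any list).
def Pre_minimax_mind_control (depth : Int) (nodeidx : Int) (max_player : Bool) (val : List Int) : Prop :=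
  0 ≤ depth ∧ depth < 64 ∧
    -(val.length : Int) ≤ nodeidx * 2 ^ depth.toNat ∧
    nodeidx * 2 ^ depth.toNat + 2 ^ depth.toNat ≤ (val.length : Int)
instance (depth : Int) (nodeidx : Int) (max_player : Bool) (val : List Int) : Decidable (Pre_minimax_mind_control depth nodeidx max_player val) := by unfold Pre_minimax_mind_control; infer_instance

def pvWitness_minimax_mind_control : Int × Int × Bool × List Int := (2, 0, true, [1, 5, 3, 2])

def Spec_minimax_mind_control (depth : Int) (nodeidx : Int) (max_player : Bool) (val : List Int) (out : Int) : Prop := out = minimax_mind_control_alt depth nodeidx max_player val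
instance (depth : Int) (nodeidx : Int) (max_player : Bool) (val : List Int) (out : Int) : Decidable (Spec_minimax_mind_control depth nodeidx max_player val out) := by unfold Spec_minimax_mind_control; infer_instance

-- ===== CLAIM (what is proved, stated in full; the proofs are below) =====
def Claim_equal_minimax_mind_control : Prop := ∀ (depth : Int) (nodeidx : Int) (max_player : Bool) (val : List Int), Dom_minimax_mind_control depth nodeidx max_player val → Pre_minimax_mind_control depth nodeidx max_player val → Spec_minimax_mind_control depth nodeidx max_player val (minimax_mind_control depth nodeidx max_player val)

-- ===== LEMMAS AND PROOFS =====

-- max of g s, g (s+1), …, g (s+n)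
def pvFmax (g : Int → Int) (s : Int) : Nat → Int
  | 0 => g s
  | n+1 => max (pvFmax g s n) (g (s + ((n : Int) + 1)))

theorem pvFmax_split (g : Int → Int) (b a : Nat) (s : Int) :
    pvFmax g s (a + b + 1) = max (pvFmax g s a) (pvFmax g (s + a + 1) b) := by
  induction b generalizing a s with
  | zero => simp [pvFmax]; ring_nf
  | succ b ih =>
    have h : a + (b + 1) + 1 = (a + b + 1) + 1 := by omega
    rw [h]
    show max (pvFmax g s (a + b + 1)) _ = _
    rw [ih a s, max_assoc]
    congr 1
    show max (pvFmax g (s + ↑a + 1) b) (g (s + (↑(a + b + 1) + 1))) = _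
    show _ = max (pvFmax g (s + ↑a + 1) b) (g (s + ↑a + 1 + (↑b + 1)))
    congr 2
    push_cast
    ring

theorem pvGoA_eq_fmax (val : List Int) (n : Nat) (idx : Int) (mp : Bool) :
    pvGoA val n idx mp = pvFmax (fun k => PySem.List.pyGetD val k 0) (idx * 2 ^ n) (2 ^ n - 1) := by
  induction n generalizing idx mp with
  | zero => cases mp <;> simp [pvGoA, pvFmax]
  | succ n ih =>
    have h1 : 1 ≤ 2 ^ n := Nat.one_le_two_pow
    have hsplit := pvFmax_split (fun k => PySem.List.pyGetD val k 0) (2 ^ n - 1) (2 ^ n - 1)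
      (idx * 2 ^ (n + 1))
    have hcount : (2 ^ n - 1) + (2 ^ n - 1) + 1 = 2 ^ (n + 1) - 1 := by
      have : 2 ^ (n + 1) = 2 * 2 ^ n := by ring
      omega
    have hcast : ((2 ^ n - 1 : Nat) : Int) = (2 : Int) ^ n - 1 := by
      push_cast [h1]; ring
    have hs1 : idx * 2 * 2 ^ n = idx * 2 ^ (n + 1) := by ring
    have hs2 : (idx * 2 + 1) * 2 ^ n = idx * 2 ^ (n + 1) + ((2 : Int) ^ n - 1) + 1 := by ring
    cases mp <;>
      · show max (pvGoA val n (idx * 2) _) (pvGoA val n (idx * 2 + 1) _) = _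
        rw [ih, ih]
        push_cast [hs1, hs2, ← hcast]
        rw [← hsplit, hcount]

theorem pvFoldB_eq_fmax (val : List Int) (start : Int) (c : Nat) :
    (PySem.List.pyRange 1 ((c : Int) + 1) 1).foldl
      (fun best i =>
        let x := PySem.List.pyGetD val (start + i) 0
        if x > best then x else best)
      (PySem.List.pyGetD val start 0) = pvFmax (fun k => PySem.List.pyGetD val k 0) start c := by
  induction c with
  | zero => simp [PySem.List.pyRange_one_eq_nil, pvFmax]
  | succ c ih =>
    have h : ((c + 1 : Nat) : Int) + 1 = ((c : Int) + 1) + 1 := by push_cast; ring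
    rw [h, PySem.List.pyRange_one_succ_right (by omega), List.foldl_append, ih]
    show (fun best i =>
        let x := PySem.List.pyGetD val (start + i) 0
        if x > best then x else best) _ _ = _
    simp only [pvFmax]
    by_cases h' : PySem.List.pyGetD val (start + ((c : Int) + 1)) 0 >
        pvFmax (fun k => PySem.List.pyGetD val k 0) start c
    · simp [h', max_eq_right (le_of_lt h')]
    · simp [h', max_eq_left (not_lt.mp h')]

-- ===== VERDICT (by name: the statement is the Claim_ definition above) =====
theorem minimax_mind_control_spec : Claim_equal_minimax_mind_control := by
  intro depth nodeidx max_player val _ _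
  unfold Spec_minimax_mind_control minimax_mind_control minimax_mind_control_alt
  have h1 : 1 ≤ 2 ^ depth.toNat := Nat.one_le_two_pow
  have hc : ((2 : Int) ^ depth.toNat) = ((2 ^ depth.toNat - 1 : Nat) : Int) + 1 := by
    push_cast [h1]; ring
  rw [pvGoA_eq_fmax]
  show _ = (PySem.List.pyRange 1 ((2 : Int) ^ depth.toNat) 1).foldl _ _
  rw [hc, pvFoldB_eq_fmax]
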